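-- pv_equiv track=rewrite | github.com/Livosys/L.I.V | backend/rag/sla_context.py | apply_sla_weighting
-- ===== SOURCE A (Python) =====
-- def apply_sla_weighting(query: str, contexts: list[str]) -> list[str]:
--     """
--     Prioritera kontext baserat på SLA-känslighet.
--     """
--     critical_keywords = ["vpn", "network", "email", "outage", "login"]
--
--     high = []
--     normal = []
--
--     for c in contexts:
--         if any(k in c.lower() for k in critical_keywords):
--             high.append(c)
--         else:
--             normal.append(c)
--
--     return high + normal
-- ===== SOURCE B (Python) =====
-- def apply_sla_weighting(query: str, contexts: list[str]) -> list[str]: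
--     """
--     Prioritera kontext baserat pa SLA-kanslighet.
--     """
--     critical_keywords = ["vpn", "network", "email", "outage", "login"]
--     return sorted(contexts, key=lambda c: 0 if any(k in c.lower() for k in critical_keywords) else 1)
-- ===== Notes on version B (the rewrite author's own statement) =====
-- stated objective: idiomatic
-- what changed: Replaced the explicit two-accumulator partition loop with a single stable sort keyed on a 0/1 SLA-criticality flag; stability makes critical items come first in original order, then the rest in original order.
import Mathlib
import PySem

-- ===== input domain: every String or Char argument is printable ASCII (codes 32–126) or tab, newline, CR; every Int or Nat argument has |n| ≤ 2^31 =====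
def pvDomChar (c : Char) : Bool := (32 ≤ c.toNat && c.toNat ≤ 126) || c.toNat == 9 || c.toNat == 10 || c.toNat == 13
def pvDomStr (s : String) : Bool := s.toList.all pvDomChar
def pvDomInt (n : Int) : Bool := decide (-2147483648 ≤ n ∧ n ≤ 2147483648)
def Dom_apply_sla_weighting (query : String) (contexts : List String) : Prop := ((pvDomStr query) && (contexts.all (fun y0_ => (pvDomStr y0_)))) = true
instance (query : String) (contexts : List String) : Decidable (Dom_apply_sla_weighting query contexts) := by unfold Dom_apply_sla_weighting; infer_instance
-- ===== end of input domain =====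

-- B replaces A's two-accumulator partition loop by one stable sort on a 0/1 criticality key (idiomatic; same result).

-- shared by both Pythons: 'any(k in c.lower() for k in critical_keywords)'
def slaCritical (c : String) : Bool :=
  ["vpn", "network", "email", "outage", "login"].any
    (fun k => PySem.Str.isIn k (PySem.Str.lower c))

-- ===== PORT A =====
def apply_sla_weighting (query : String) (contexts : List String) : List String :=
  let r := contexts.foldl
    (fun (acc : List String × List String) c =>
      if slaCritical c then (acc.1 ++ [c], acc.2) else (acc.1, acc.2 ++ [c]))
    ([], [])
  r.1 ++ r.2

-- ===== PORT B =====
def apply_sla_weighting_alt (query : String) (contexts : List String) : List String :=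
  PySem.List.sorted contexts (fun c => if slaCritical c then (0 : Nat) else 1)

-- ===== PRECONDITION & SPEC =====
def Spec_apply_sla_weighting (query : String) (contexts : List String) (out : List String) : Prop := out = apply_sla_weighting_alt query contexts
instance (query : String) (contexts : List String) (out : List String) : Decidable (Spec_apply_sla_weighting query contexts out) := by unfold Spec_apply_sla_weighting; infer_instance

-- ===== CLAIM (what is proved, stated in full; the proofs are below) =====
def Claim_equal_apply_sla_weighting : Prop := ∀ (query : String) (contexts : List String), Dom_apply_sla_weighting query contexts → Spec_apply_sla_weighting query contexts (apply_sla_weighting query contexts)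

-- ===== LEMMAS AND PROOFS =====

-- key used by B's sort
def slaKey (c : String) : Nat := if slaCritical c then 0 else 1

-- insertBy with a never-before prefix and an always-before tail drops x exactly between them
theorem insertBy_split {α : Type} (before : α → α → Bool) (x : α) :
    ∀ (h n : List α), (∀ y ∈ h, before x y = false) → (∀ z ∈ n, before x z = true) →
      PySem.List.insertBy before x (h ++ n) = h ++ x :: n := by
  intro h
  induction h with
  | nil =>
    intro n _ hn
    cases n with
    | nil => simp [PySem.List.insertBy]
    | cons z n' => simp [PySem.List.insertBy, hn z (by simp)]
  | cons y h' ih =>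
    intro n hh hn
    have hy : before x y = false := hh y (by simp)
    simp only [List.cons_append, PySem.List.insertBy, hy]
    simp [ih n (fun y hy => hh y (by simp [hy])) hn]

-- A's partition loop, characterised
theorem partA_inv : ∀ (xs h n : List String),
    xs.foldl (fun (acc : List String × List String) c =>
      if slaCritical c then (acc.1 ++ [c], acc.2) else (acc.1, acc.2 ++ [c])) (h, n)
    = (h ++ xs.filter slaCritical, n ++ xs.filter (fun c => !slaCritical c)) := by
  intro xs
  induction xs with
  | nil => simp
  | cons x xs ih =>
    intro h n
    by_cases hx : slaCritical x = true
    · simp [List.foldl_cons, hx, ih]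
    · simp only [Bool.not_eq_true] at hx
      simp [List.foldl_cons, hx, ih]

-- B's insertion-sort fold, characterised by the same partition
theorem partB_inv : ∀ (xs h n : List String),
    (∀ y ∈ h, slaCritical y = true) → (∀ z ∈ n, slaCritical z = false) →
    xs.foldl (fun acc x => PySem.List.insertBy (fun a b => decide (slaKey a < slaKey b)) x acc) (h ++ n)
    = (h ++ xs.filter slaCritical) ++ (n ++ xs.filter (fun c => !slaCritical c)) := by
  intro xs
  induction xs with
  | nil => intro h n _ _; simp
  | cons x xs ih =>
    intro h n hh hn
    simp only [List.foldl_cons]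
    by_cases hx : slaCritical x = true
    · have hins : PySem.List.insertBy (fun a b => decide (slaKey a < slaKey b)) x (h ++ n) = h ++ x :: n := by
        apply insertBy_split
        · intro y hy; simp [slaKey, hx, hh y hy]
        · intro z hz; simp [slaKey, hx, hn z hz]
      have : h ++ x :: n = (h ++ [x]) ++ n := by simp
      rw [hins, this, ih (h ++ [x]) n
          (by intro y hy; rcases List.mem_append.1 hy with hy | hy
              · exact hh y hy
              · simp at hy; subst hy; exact hx) hn]
      simp [hx]
    · simp only [Bool.not_eq_true] at hx
      have hins : PySem.List.insertBy (fun a b => decide (slaKey a < slaKey b)) x ((h ++ n) ++ []) = (h ++ n) ++ x :: [] := by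
        apply insertBy_split
        · intro y hy
          rcases List.mem_append.1 hy with hy | hy
          · simp [slaKey, hx, hh y hy]
          · simp [slaKey, hx, hn y hy]
        · intro z hz; simp at hz
      simp only [List.append_nil] at hins
      have hxn : h ++ n ++ [x] = h ++ (n ++ [x]) := by simp
      rw [hins, hxn, ih h (n ++ [x]) hh
          (by intro z hz; rcases List.mem_append.1 hz with hz | hz
              · exact hn z hz
              · simp at hz; subst hz; exact hx)]
      simp [hx]

-- ===== VERDICT (by name: the statement is the Claim_ definition above) =====
theorem apply_sla_weighting_spec : Claim_equal_apply_sla_weighting := by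
  intro query contexts _
  show apply_sla_weighting query contexts = apply_sla_weighting_alt query contexts
  unfold apply_sla_weighting apply_sla_weighting_alt
  rw [PySem.List.sorted_eq_foldl_insertBy]
  have hb := partB_inv contexts [] [] (by simp) (by simp)
  simp only [List.nil_append] at hb
  rw [partA_inv]
  exact hb.symm
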